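-- pv_equiv track=rewrite | github.com/ward-tech-solutions/ward-flux-credobank | monitoring/snmp/oids.py | classify_device_type
-- ===== SOURCE A (Python) =====
-- def classify_device_type(sys_descr: str) -> str:
--     """
--     Classify device type based on sysDescr
--
--     Args:
--         sys_descr: System description string
--
--     Returns:
--         Device type classification
--     """
--     sys_descr_lower = sys_descr.lower()
--
--     # Router detection
--     if any(keyword in sys_descr_lower for keyword in ["router", "cisco ios"]):
--         return "router"
--
--     # Switch detection
--     if any(keyword in sys_descr_lower for keyword in ["switch", "catalyst", "procurve"]):
--         return "switch"
--
--     # Firewall detection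
--     if any(keyword in sys_descr_lower for keyword in ["firewall", "fortigate", "asa", "srx", "checkpoint", "palo alto"]):
--         return "firewall"
--
--     # Server detection - Linux
--     if any(keyword in sys_descr_lower for keyword in ["linux", "ubuntu", "centos", "debian", "redhat", "fedora"]):
--         return "server-linux"
--
--     # Server detection - Windows
--     if "windows" in sys_descr_lower:
--         return "server-windows"
--
--     # Network appliances
--     if any(keyword in sys_descr_lower for keyword in ["wireless", "wlan", "access point", "ap"]):
--         return "wireless-ap"
--
--     # UPS
--     if any(keyword in sys_descr_lower for keyword in ["ups", "apc", "eaton"]):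
--         return "ups"
--
--     # Printer
--     if "printer" in sys_descr_lower:
--         return "printer"
--
--     # Generic fallback
--     return "generic"
-- ===== SOURCE B (Python) =====
-- # Flat keyword->priority table; one full scan keeping the minimum matching
-- # priority, then index into the label array (no short-circuit if-chain).
-- LABELS = ["router", "switch", "firewall", "server-linux", "server-windows",
--           "wireless-ap", "ups", "printer", "generic"]
--
-- KEYWORDS = [
--     ("router", 0), ("cisco ios", 0),
--     ("switch", 1), ("catalyst", 1), ("procurve", 1),
--     ("firewall", 2), ("fortigate", 2), ("asa", 2), ("srx", 2),
--     ("checkpoint", 2), ("palo alto", 2),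
--     ("linux", 3), ("ubuntu", 3), ("centos", 3), ("debian", 3),
--     ("redhat", 3), ("fedora", 3),
--     ("windows", 4),
--     ("wireless", 5), ("wlan", 5), ("access point", 5), ("ap", 5),
--     ("ups", 6), ("apc", 6), ("eaton", 6),
--     ("printer", 7),
-- ]
--
--
-- def classify_device_type(sys_descr: str) -> str:
--     s = sys_descr.lower()
--     best = 8  # index of "generic"
--     for kw, prio in KEYWORDS:
--         if kw in s:
--             best = min(best, prio)
--     return LABELS[best]
-- ===== Notes on version B (the rewrite author's own statement) =====
-- stated objective: alternative
-- what changed: Replaces the short-circuit if-chain over per-category keyword groups by a flat keyword-to-priority table scanned in full with a min accumulator, then indexing a label array; correctness relies on min over grouped priorities picking the first matching category.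
import Mathlib
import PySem

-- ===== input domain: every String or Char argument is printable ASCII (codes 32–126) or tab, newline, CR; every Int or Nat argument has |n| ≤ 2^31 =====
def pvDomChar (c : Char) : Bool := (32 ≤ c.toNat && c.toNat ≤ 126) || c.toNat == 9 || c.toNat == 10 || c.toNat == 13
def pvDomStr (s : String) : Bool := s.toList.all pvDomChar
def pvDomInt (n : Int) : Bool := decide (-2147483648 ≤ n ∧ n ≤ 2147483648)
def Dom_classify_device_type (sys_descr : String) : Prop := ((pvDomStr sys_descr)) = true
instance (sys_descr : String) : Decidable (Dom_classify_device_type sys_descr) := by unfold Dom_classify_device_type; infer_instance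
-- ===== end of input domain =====

-- B replaces A's unrolled short-circuit if-chain by a flat keyword→priority table scanned in full
-- with a min accumulator, indexing a label array (alternative decomposition, same cost).


-- ===== PORT A =====
def classify_device_type (sys_descr : String) : String :=
  let sys_descr_lower := PySem.Str.lower sys_descr
  if ["router", "cisco ios"].any (fun k => PySem.Str.isIn k sys_descr_lower) then "router"
  else if ["switch", "catalyst", "procurve"].any (fun k => PySem.Str.isIn k sys_descr_lower) then "switch"
  else if ["firewall", "fortigate", "asa", "srx", "checkpoint", "palo alto"].any (fun k => PySem.Str.isIn k sys_descr_lower) then "firewall"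
  else if ["linux", "ubuntu", "centos", "debian", "redhat", "fedora"].any (fun k => PySem.Str.isIn k sys_descr_lower) then "server-linux"
  else if PySem.Str.isIn "windows" sys_descr_lower then "server-windows"
  else if ["wireless", "wlan", "access point", "ap"].any (fun k => PySem.Str.isIn k sys_descr_lower) then "wireless-ap"
  else if ["ups", "apc", "eaton"].any (fun k => PySem.Str.isIn k sys_descr_lower) then "ups"
  else if PySem.Str.isIn "printer" sys_descr_lower then "printer"
  else "generic"

-- ===== PORT B =====
def pvLabels : List String :=
  ["router", "switch", "firewall", "server-linux", "server-windows",
   "wireless-ap", "ups", "printer", "generic"]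

def pvKeywords : List (String × Nat) :=
  [ ("router", 0), ("cisco ios", 0),
    ("switch", 1), ("catalyst", 1), ("procurve", 1),
    ("firewall", 2), ("fortigate", 2), ("asa", 2), ("srx", 2),
    ("checkpoint", 2), ("palo alto", 2),
    ("linux", 3), ("ubuntu", 3), ("centos", 3), ("debian", 3),
    ("redhat", 3), ("fedora", 3),
    ("windows", 4),
    ("wireless", 5), ("wlan", 5), ("access point", 5), ("ap", 5),
    ("ups", 6), ("apc", 6), ("eaton", 6),
    ("printer", 7) ]

def classify_device_type_alt (sys_descr : String) : String :=
  let s := PySem.Str.lower sys_descr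
  let best := pvKeywords.foldl
    (fun best kp => if PySem.Str.isIn kp.1 s then min best kp.2 else best) 8
  pvLabels.getD best "generic"

-- ===== PRECONDITION & SPEC =====
def Spec_classify_device_type (sys_descr : String) (out : String) : Prop := out = classify_device_type_alt sys_descr
instance (sys_descr : String) (out : String) : Decidable (Spec_classify_device_type sys_descr out) := by unfold Spec_classify_device_type; infer_instance

-- ===== CLAIM (what is proved, stated in full; the proofs are below) =====
def Claim_equal_classify_device_type : Prop := ∀ (sys_descr : String), Dom_classify_device_type sys_descr → Spec_classify_device_type sys_descr (classify_device_type sys_descr)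

-- ===== LEMMAS AND PROOFS =====

-- one priority group of the flat table: folding it takes the accumulator to
-- min acc p iff any of its keywords satisfies f, else leaves it unchanged
theorem pv_fold_group (f : String → Bool) (p : Nat) (ks : List String) (acc : Nat) :
    (ks.map (fun k => (k, p))).foldl
      (fun best kp => if f kp.1 then min best kp.2 else best) acc
    = if ks.any f then min acc p else acc := by
  induction ks generalizing acc with
  | nil => simp
  | cons k rest ih =>
    simp only [List.map, List.foldl, List.any_cons, Bool.or_eq_true]
    rw [ih]
    by_cases hk : f k = true <;> by_cases hr : rest.any f = true <;>
      simp [hk, hr]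

theorem pvKeywords_groups :
    pvKeywords =
      (["router", "cisco ios"].map (fun k => (k, 0))) ++
      (["switch", "catalyst", "procurve"].map (fun k => (k, 1))) ++
      (["firewall", "fortigate", "asa", "srx", "checkpoint", "palo alto"].map (fun k => (k, 2))) ++
      (["linux", "ubuntu", "centos", "debian", "redhat", "fedora"].map (fun k => (k, 3))) ++
      (["windows"].map (fun k => (k, 4))) ++
      (["wireless", "wlan", "access point", "ap"].map (fun k => (k, 5))) ++
      (["ups", "apc", "eaton"].map (fun k => (k, 6))) ++
      (["printer"].map (fun k => (k, 7))) := rfl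

-- A's if-chain equals B's min-fold followed by the label lookup, for any keyword test f
theorem pv_chain_eq_fold (f : String → Bool) :
    (if ["router", "cisco ios"].any f then "router"
     else if ["switch", "catalyst", "procurve"].any f then "switch"
     else if ["firewall", "fortigate", "asa", "srx", "checkpoint", "palo alto"].any f then "firewall"
     else if ["linux", "ubuntu", "centos", "debian", "redhat", "fedora"].any f then "server-linux"
     else if f "windows" then "server-windows"
     else if ["wireless", "wlan", "access point", "ap"].any f then "wireless-ap"
     else if ["ups", "apc", "eaton"].any f then "ups"
     else if f "printer" then "printer"
     else "generic")
    = pvLabels.getD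
        (pvKeywords.foldl (fun best kp => if f kp.1 then min best kp.2 else best) 8) "generic" := by
  rw [pvKeywords_groups]
  simp only [List.foldl_append, pv_fold_group]
  by_cases h1 : (["router", "cisco ios"] : List String).any f = true <;>
  by_cases h2 : (["switch", "catalyst", "procurve"] : List String).any f = true <;>
  by_cases h3 : (["firewall", "fortigate", "asa", "srx", "checkpoint", "palo alto"] : List String).any f = true <;>
  by_cases h4 : (["linux", "ubuntu", "centos", "debian", "redhat", "fedora"] : List String).any f = true <;>
  by_cases h5 : f "windows" = true <;>
  by_cases h6 : (["wireless", "wlan", "access point", "ap"] : List String).any f = true <;>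
  by_cases h7 : (["ups", "apc", "eaton"] : List String).any f = true <;>
  by_cases h8 : f "printer" = true <;>
    simp [h1, h2, h3, h4, h5, h6, h7, h8, pvLabels]

-- ===== VERDICT (by name: the statement is the Claim_ definition above) =====
theorem classify_device_type_spec : Claim_equal_classify_device_type := by
  intro str _
  unfold Spec_classify_device_type
  show classify_device_type str = classify_device_type_alt str
  simp only [classify_device_type, classify_device_type_alt]
  exact pv_chain_eq_fold (fun k => PySem.Str.isIn k (PySem.Str.lower str))
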